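-- pv_equiv track=rewrite | github.com/HishamKhalil1990/madlib-cli | madlib_cli/madlib.py | replace_part_with_num
-- ===== SOURCE A (Python) =====
-- def replace_part_with_num(word):
--     new_str = ""
--     stop = False
--     counter = 0
--     for char in word:
--         if char == "{":
--             new_str = new_str + char + str(counter)
--             counter += 1
--             stop = True
--         if char == "}":
--             stop = False
--         if stop == False:
--             new_str = new_str + char
--     return new_str
-- ===== SOURCE B (Python) =====
-- def replace_part_with_num(word):
--     # Index-based skip-scan: on '{' emit '{N' and skip the run of non-brace
--     # characters; no stop flag, pieces joined at the end.
--     out = []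
--     i = 0
--     n = len(word)
--     counter = 0
--     while i < n:
--         c = word[i]
--         if c == '{':
--             out.append('{' + str(counter))
--             counter += 1
--             i += 1
--             while i < n and word[i] not in '{}':
--                 i += 1
--         else:
--             out.append(c)
--             i += 1
--     return ''.join(out)
-- ===== Notes on version B (the rewrite author's own statement) =====
-- stated objective: alternative
-- what changed: Replaces the stop-flag state machine that inspects every character with an index-based skip-scan: at each opening brace it emits the brace plus the counter and an inner loop skips the whole run of dropped non-brace characters; collected pieces are joined at the end.
import Mathlib
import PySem

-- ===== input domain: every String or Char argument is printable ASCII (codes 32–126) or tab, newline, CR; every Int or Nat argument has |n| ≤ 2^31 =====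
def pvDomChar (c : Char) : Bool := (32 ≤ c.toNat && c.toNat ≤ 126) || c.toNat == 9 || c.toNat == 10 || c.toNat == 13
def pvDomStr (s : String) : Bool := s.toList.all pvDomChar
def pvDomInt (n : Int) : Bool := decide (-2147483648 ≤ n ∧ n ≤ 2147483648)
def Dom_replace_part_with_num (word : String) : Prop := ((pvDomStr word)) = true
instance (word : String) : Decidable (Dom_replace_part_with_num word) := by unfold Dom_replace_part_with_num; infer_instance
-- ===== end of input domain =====

-- B replaces A's per-character stop-flag state machine by an index skip-scan
-- ('{' emits '{N' then skips the run of non-brace characters); same return value.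

-- ===== PORT A =====
-- A: fold over the characters with state (new_str, stop, counter).
def replace_part_with_num (word : String) : String :=
  let r := word.toList.foldl
    (fun (st : List Char × Bool × Int) char =>
      let st :=
        if char = '{' then
          (st.1 ++ char :: (PySem.Int.toStr st.2.2).toList, true, st.2.2 + 1)
        else st
      let st := if char = '}' then (st.1, false, st.2.2) else st
      if st.2.1 = false then (st.1 ++ [char], st.2.1, st.2.2) else st)
    ([], false, 0)
  String.mk r.1

-- ===== PORT B =====
-- B: skip-scan; the inner while loop skipping non-brace characters is dropWhile.
def pvNonBrace (c : Char) : Bool := c ≠ '{' && c ≠ '}'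

def pvGoB : List Char → Int → List Char
  | [], _ => []
  | c :: cs, n =>
    if c = '{' then
      '{' :: (PySem.Int.toStr n).toList ++ pvGoB (cs.dropWhile pvNonBrace) (n + 1)
    else
      c :: pvGoB cs n
  termination_by cs _ => cs.length
  decreasing_by
    · simp only [List.length_cons]
      exact Nat.lt_succ_of_le (List.length_dropWhile_le _ _)
    · simp

def replace_part_with_num_alt (word : String) : String :=
  String.mk (pvGoB word.toList 0)

-- ===== PRECONDITION & SPEC =====
def Spec_replace_part_with_num (word : String) (out : String) : Prop := out = replace_part_with_num_alt word
instance (word : String) (out : String) : Decidable (Spec_replace_part_with_num word out) := by unfold Spec_replace_part_with_num; infer_instance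

-- ===== CLAIM (what is proved, stated in full; the proofs are below) =====
def Claim_equal_replace_part_with_num : Prop := ∀ (word : String), Dom_replace_part_with_num word → Spec_replace_part_with_num word (replace_part_with_num word)

-- ===== LEMMAS AND PROOFS =====

-- the step function of A's fold, named for the proofs
def pvStepA (st : List Char × Bool × Int) (char : Char) : List Char × Bool × Int :=
  let st :=
    if char = '{' then
      (st.1 ++ char :: (PySem.Int.toStr st.2.2).toList, true, st.2.2 + 1)
    else st
  let st := if char = '}' then (st.1, false, st.2.2) else st
  if st.2.1 = false then (st.1 ++ [char], st.2.1, st.2.2) else st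

theorem pvFoldA_eq_goB : ∀ (cs : List Char) (acc : List Char) (n : Int),
    (cs.foldl pvStepA (acc, false, n)).1 = acc ++ pvGoB cs n
    ∧ (cs.foldl pvStepA (acc, true, n)).1 = acc ++ pvGoB (cs.dropWhile pvNonBrace) n := by
  intro cs
  induction cs with
  | nil => intro acc n; simp [pvGoB]
  | cons c cs ih =>
    intro acc n
    by_cases hb : c = '{'
    · subst hb
      constructor
      · have := (ih (acc ++ '{' :: (PySem.Int.toStr n).toList) (n + 1)).2
        simpa [List.foldl_cons, pvStepA, pvGoB, List.append_assoc] using this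
      · have := (ih (acc ++ '{' :: (PySem.Int.toStr n).toList) (n + 1)).2
        simpa [List.foldl_cons, pvStepA, pvGoB, List.dropWhile, pvNonBrace, List.append_assoc] using this
    · by_cases hc : c = '}'
      · subst hc
        constructor
        · have := (ih (acc ++ ['}']) n).1
          simp [List.foldl_cons, pvStepA, pvGoB, this]
        · have := (ih (acc ++ ['}']) n).1
          simp [List.foldl_cons, pvStepA, pvGoB, List.dropWhile, pvNonBrace, this]
      · constructor
        · have := (ih (acc ++ [c]) n).1
          simp [List.foldl_cons, pvStepA, pvGoB, hb, hc, this]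
        · have := (ih acc n).2
          simp [List.foldl_cons, pvStepA, hb, hc, List.dropWhile, pvNonBrace, this]

theorem pvPortA_eq : ∀ (word : String), replace_part_with_num word = replace_part_with_num_alt word := by
  intro word
  have h := (pvFoldA_eq_goB word.toList [] 0).1
  simp only [replace_part_with_num, replace_part_with_num_alt]
  have : (word.toList.foldl
      (fun (st : List Char × Bool × Int) char =>
        let st :=
          if char = '{' then
            (st.1 ++ char :: (PySem.Int.toStr st.2.2).toList, true, st.2.2 + 1)
          else st
        let st := if char = '}' then (st.1, false, st.2.2) else st
        if st.2.1 = false then (st.1 ++ [char], st.2.1, st.2.2) else st)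
      ([], false, 0)) = word.toList.foldl pvStepA ([], false, 0) := rfl
  rw [this, h]
  simp

-- ===== VERDICT (by name: the statement is the Claim_ definition above) =====
theorem replace_part_with_num_spec : Claim_equal_replace_part_with_num := by
  intro word _
  exact pvPortA_eq word
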